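-- pv_equiv track=rewrite | github.com/GJzh/Leetcode | python/420. Strong Password Checker.py | repeatedCharacters
-- ===== SOURCE A (Python) =====
-- def repeatedCharacters(s):
--     repeats = [[], [], []]
--     num = 0
--     cnt = 1
--     for i in range(1, len(s)):
--         if s[i] == s[i-1]:
--             cnt += 1
--         else:
--             if cnt >= 3:
--                 repeats[cnt%3].append(cnt)
--                 num += cnt // 3
--             cnt = 1
--
--     if cnt >= 3:
--         repeats[cnt%3].append(cnt)
--         num += cnt // 3
--     return repeats, num
-- ===== SOURCE B (Python) =====
-- def repeatedCharacters(s):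
--     # Runs are recovered from their boundary indices: a comprehension collects the
--     # positions where a new run starts, and each run's length is the difference of
--     # adjacent boundaries (the string length closing the last run).
--     n = len(s)
--     starts = [i for i in range(n) if i == 0 or s[i] != s[i - 1]]
--     repeats = [[], [], []]
--     num = 0
--     for a, b in zip(starts, starts[1:] + [n]):
--         L = b - a
--         if L >= 3:
--             repeats[L % 3].append(L)
--             num += L // 3
--     return repeats, num
-- ===== Notes on version B (the rewrite author's own statement) =====
-- stated objective: alternative
-- what changed: B never counts run lengths: a comprehension collects the boundary indices where a new run starts, then run lengths are obtained as differences of adjacent boundaries via zip(starts, starts[1:]+[n]) and classified, instead of A's single scan threading a live counter with duplicated flush code.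
import Mathlib
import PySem

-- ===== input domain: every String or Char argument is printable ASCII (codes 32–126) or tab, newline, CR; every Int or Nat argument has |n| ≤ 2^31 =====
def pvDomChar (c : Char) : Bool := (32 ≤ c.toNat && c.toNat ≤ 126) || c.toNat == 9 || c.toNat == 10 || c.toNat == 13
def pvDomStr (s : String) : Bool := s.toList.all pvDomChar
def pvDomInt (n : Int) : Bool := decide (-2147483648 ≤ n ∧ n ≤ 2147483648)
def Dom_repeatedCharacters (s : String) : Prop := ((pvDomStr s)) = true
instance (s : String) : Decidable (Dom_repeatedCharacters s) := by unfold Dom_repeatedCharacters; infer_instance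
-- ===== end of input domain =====

-- B recovers runs from their boundary indices (a comprehension of run-start positions,
-- lengths by differencing adjacent boundaries) instead of A's live counter scan
-- (objective: alternative decomposition, same asymptotic cost).

-- shared flush code ('if L >= 3: repeats[L%3].append(L); num += L//3'), identical lines in both Pythons
def pvAppend3 (r : List Int × List Int × List Int) (c : Int) : List Int × List Int × List Int :=
  if PySem.Int.mod c 3 == 0 then (r.1 ++ [c], r.2.1, r.2.2)
  else if PySem.Int.mod c 3 == 1 then (r.1, r.2.1 ++ [c], r.2.2)
  else (r.1, r.2.1, r.2.2 ++ [c])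

def pvFlush (st : (List Int × List Int × List Int) × Int) (cnt : Int) :
    (List Int × List Int × List Int) × Int :=
  if cnt ≥ 3 then (pvAppend3 st.1 cnt, st.2 + PySem.Int.floordiv cnt 3) else st

-- ===== PORT A =====
def repeatedCharacters (s : String) : List (List Int) × Int :=
  let cs := s.toList
  let st := (PySem.List.pyRange 1 (cs.length : Int) 1).foldl
    (fun (st : ((List Int × List Int × List Int) × Int) × Int) i =>
      if PySem.List.pyGetD cs i ' ' == PySem.List.pyGetD cs (i - 1) ' '
      then (st.1, st.2 + 1)
      else (pvFlush st.1 st.2, 1))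
    ((([], [], []), 0), 1)
  let fin := pvFlush st.1 st.2
  ([fin.1.1, fin.1.2.1, fin.1.2.2], fin.2)

-- ===== PORT B =====
def repeatedCharacters_alt (s : String) : List (List Int) × Int :=
  let cs := s.toList
  let n : Int := (cs.length : Int)
  -- starts = [i for i in range(n) if i == 0 or s[i] != s[i-1]]
  let starts := (PySem.List.pyRange 0 n 1).filter
    (fun i => i == 0 || !(PySem.List.pyGetD cs i ' ' == PySem.List.pyGetD cs (i - 1) ' '))
  -- for a, b in zip(starts, starts[1:] + [n]): L = b - a; flush L
  let st := (starts.zip (PySem.List.slice starts (some 1) none ++ [n])).foldl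
    (fun st ab => pvFlush st (ab.2 - ab.1)) (([], [], []), 0)
  ([st.1.1, st.1.2.1, st.1.2.2], st.2)

-- ===== PRECONDITION & SPEC =====
def Spec_repeatedCharacters (s : String) (out : List (List Int) × Int) : Prop := out = repeatedCharacters_alt s
instance (s : String) (out : List (List Int) × Int) : Decidable (Spec_repeatedCharacters s out) := by unfold Spec_repeatedCharacters; infer_instance

-- ===== CLAIM (what is proved, stated in full; the proofs are below) =====
def Claim_equal_repeatedCharacters : Prop := ∀ (s : String), Dom_repeatedCharacters s → Spec_repeatedCharacters s (repeatedCharacters s)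

-- ===== LEMMAS AND PROOFS =====

-- run lengths of a string, as structural recursion (proof-side bridge between the two ports)
def pvRuns : List Char → List Int
  | [] => []
  | c :: rest =>
      ((1 + (rest.takeWhile (· == c)).length : Int)) :: pvRuns (rest.dropWhile (· == c))
  termination_by cs => cs.length
  decreasing_by simpa using Nat.lt_succ_of_le (List.length_dropWhile_le _ _)

theorem pvRuns_cons (c : Char) (rest : List Char) :
    pvRuns (c :: rest)
      = ((1 + (rest.takeWhile (· == c)).length : Int))
          :: pvRuns (rest.dropWhile (· == c)) := by
  rw [pvRuns]

-- A's loop, rephrased as structural recursion carrying (prev char, state)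
def pvPairFold : Char → List Char → ((List Int × List Int × List Int) × Int) × Int →
    ((List Int × List Int × List Int) × Int) × Int
  | _, [], st => st
  | c, x :: xs, st =>
      pvPairFold x xs (if x == c then (st.1, st.2 + 1) else (pvFlush st.1 st.2, 1))

theorem pvRangeFold_eq_pairFold (cs : List Char) : ∀ (c : Char)
    (st : ((List Int × List Int × List Int) × Int) × Int),
    (List.range cs.length).foldl
      (fun st k =>
        if (c :: cs).getD (1 + k) ' ' == (c :: cs).getD k ' '
        then (st.1, st.2 + 1)
        else (pvFlush st.1 st.2, 1)) st
    = pvPairFold c cs st := by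
  induction cs with
  | nil => intro c st; simp [pvPairFold]
  | cons x xs ih =>
      intro c st
      simp only [List.length_cons]
      rw [List.range_succ_eq_map]
      simp only [List.foldl_cons, List.foldl_map, pvPairFold]
      rw [← ih x]
      congr 1

-- key invariant: flushing after A's pair loop = classification fold over the remaining runs
theorem pvKey (rest : List Char) : ∀ (c : Char)
    (st : (List Int × List Int × List Int) × Int) (cnt : Int),
    pvFlush (pvPairFold c rest (st, cnt)).1 (pvPairFold c rest (st, cnt)).2
    = (pvRuns (rest.dropWhile (· == c))).foldl pvFlush
        (pvFlush st (cnt + ((rest.takeWhile (· == c)).length : Int))) := by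
  induction rest with
  | nil => intro c st cnt; simp [pvPairFold, pvRuns]
  | cons x xs ih =>
      intro c st cnt
      by_cases h : x == c
      · have hx : x = c := eq_of_beq h
        subst hx
        simp only [pvPairFold, List.dropWhile_cons, h, if_pos,
          List.takeWhile_cons, List.length_cons]
        rw [ih x]
        congr 2
        push_cast
        ring
      · simp only [pvPairFold, List.dropWhile_cons, List.takeWhile_cons, h,
          Bool.false_eq_true, reduceIte]
        rw [ih x, pvRuns_cons]
        simp only [List.foldl_cons, List.length_nil]
        congr 2
        simp

-- ---- B-side machinery: boundary indices → run lengths ----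

-- break positions: j records that position j+1 starts a new run in c :: rest
def pvBrk : Char → List Char → List Nat
  | _, [] => []
  | c, x :: xs => (if x == c then [] else [0]) ++ (pvBrk x xs).map (· + 1)

-- Nat-level run-start positions of cs
def pvSN (cs : List Char) : List Nat :=
  (List.range cs.length).filter (fun k => k == 0 || !(cs.getD k ' ' == cs.getD (k - 1) ' '))

-- adjacent differences with closing bound, recursively
def pvDiffs : List Int → Int → List Int
  | [], _ => []
  | [a], e => [e - a]
  | a :: b :: r, e => (b - a) :: pvDiffs (b :: r) e

theorem pvZipForm (l : List Int) (e : Int) :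
    (l.zip (l.drop 1 ++ [e])).map (fun ab => ab.2 - ab.1) = pvDiffs l e := by
  induction l with
  | nil => simp [pvDiffs]
  | cons a t ih =>
      cases t with
      | nil => simp [pvDiffs]
      | cons b r =>
          simp only [List.drop_succ_cons, List.drop_zero] at ih ⊢
          simp only [List.zip_cons_cons, List.cons_append, List.map_cons, pvDiffs]
          rw [← ih]

theorem pvBrkEq (rest : List Char) : ∀ (c : Char),
    (List.range rest.length).filter
      (fun j => !(rest.getD j ' ' == (c :: rest).getD j ' ')) = pvBrk c rest := by
  induction rest with
  | nil => intro c; simp [pvBrk]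
  | cons x xs ih =>
      intro c
      simp only [List.length_cons]
      rw [List.range_succ_eq_map, List.filter_cons, List.filter_map]
      have hp : ∀ j ∈ List.range xs.length,
          ((fun j => !((x :: xs).getD j ' ' == (c :: x :: xs).getD j ' ')) ∘ Nat.succ) j
          = (fun j => !(xs.getD j ' ' == (x :: xs).getD j ' ')) j := by
        intro j _
        simp [List.getD]
      rw [List.filter_congr hp, ih x]
      by_cases h : x == c
      · simp [pvBrk, h, Function.comp]
      · simp [pvBrk, h, Function.comp]

theorem pvSN_cons (c : Char) (rest : List Char) :
    pvSN (c :: rest) = 0 :: (pvBrk c rest).map (· + 1) := by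
  unfold pvSN
  simp only [List.length_cons]
  rw [List.range_succ_eq_map, List.filter_cons, List.filter_map]
  have hp : ∀ j ∈ List.range rest.length,
      ((fun k => k == 0 || !((c :: rest).getD k ' ' == (c :: rest).getD (k - 1) ' ')) ∘ Nat.succ) j
      = (fun j => !(rest.getD j ' ' == (c :: rest).getD j ' ')) j := by
    intro j _
    simp [List.getD]
  rw [List.filter_congr hp, pvBrkEq rest c]
  simp [Function.comp, Nat.succ_eq_add_one]

theorem pvShiftI (l : List Int) (e : Int) :
    pvDiffs (l.map (· + 1)) (e + 1) = pvDiffs l e := by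
  induction l with
  | nil => simp [pvDiffs]
  | cons a t ih =>
      cases t with
      | nil => simp [pvDiffs]
      | cons b r =>
          simp only [List.map_cons, pvDiffs] at ih ⊢
          rw [ih]
          congr 1
          ring

theorem pvInc (l : List Int) (e : Int) :
    pvDiffs (0 :: l.map (· + 1)) (e + 1)
      = ((pvDiffs (0 :: l) e).headD 0 + 1) :: (pvDiffs (0 :: l) e).tail := by
  cases l with
  | nil => simp [pvDiffs]
  | cons a t =>
      simp only [List.map_cons, pvDiffs]
      have : (a + 1) :: t.map (· + 1) = (a :: t).map (· + 1) := by simp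
      rw [this, pvShiftI]
      simp

-- main bridge: differences of boundary positions are exactly the run lengths
theorem pvCast1 (L : List Nat) :
    (L.map (· + 1)).map (fun k : Nat => (k : Int))
      = (L.map (fun k : Nat => (k : Int))).map (· + 1) := by
  induction L with
  | nil => simp
  | cons a t ih =>
      simp only [List.map_cons] at ih ⊢
      rw [ih]
      congr 1

theorem pvMain (rest : List Char) : ∀ (c : Char),
    pvDiffs (0 :: ((pvBrk c rest).map (fun k : Nat => (k : Int))).map (· + 1))
        ((rest.length : Int) + 1) = pvRuns (c :: rest) := by
  induction rest with
  | nil => intro c; simp [pvBrk, pvDiffs, pvRuns]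
  | cons x xs ih =>
      intro c
      by_cases h : x == c
      · have hx : x = c := eq_of_beq h
        subst hx
        simp only [pvBrk, h, if_pos, List.nil_append]
        rw [pvCast1]
        have hlen : ((x :: xs).length : Int) + 1 = ((xs.length : Int) + 1) + 1 := by
          push_cast [List.length_cons]; ring
        rw [hlen, pvInc, ih x, pvRuns_cons]
        have hd : (x :: xs).dropWhile (· == x) = xs.dropWhile (· == x) := by
          simp [List.dropWhile_cons]
        have ht : (x :: xs).takeWhile (· == x) = x :: xs.takeWhile (· == x) := by
          simp [List.takeWhile_cons]
        rw [pvRuns_cons, hd, ht]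
        simp only [List.length_cons, List.headD_cons, List.tail_cons]
        congr 1
      · simp only [pvBrk, h, Bool.false_eq_true, reduceIte, List.singleton_append,
          List.map_cons]
        rw [pvCast1]
        have h00 : ((0 : Nat) : Int) = (0 : Int) := by norm_num
        rw [h00]
        show pvDiffs (0 :: (0 + 1) :: ((((pvBrk x xs).map (fun k : Nat => (k : Int))).map (· + 1)).map (· + 1)))
            (((x :: xs).length : Int) + 1) = pvRuns (c :: x :: xs)
        rw [pvDiffs]
        have hsh : ((0 : Int) + 1) :: (((pvBrk x xs).map (fun k : Nat => (k : Int))).map (· + 1)).map (· + 1)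
            = ((0 : Int) :: ((pvBrk x xs).map (fun k : Nat => (k : Int))).map (· + 1)).map (· + 1) := by
          simp
        have hlen : ((x :: xs).length : Int) + 1 = (((xs.length : Int) + 1) + 1) := by
          push_cast [List.length_cons]; ring
        rw [hsh, hlen, pvShiftI, ih x]
        have ht : (x :: xs).takeWhile (· == c) = [] := by
          simp [h]
        have hd : (x :: xs).dropWhile (· == c) = x :: xs := by
          simp [h]
        conv_rhs => rw [pvRuns_cons]
        rw [ht, hd]
        simp

-- the port's starts list is the cast of pvSN
theorem pvStartsEq (cs : List Char) :
    (PySem.List.pyRange 0 (cs.length : Int) 1).filter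
      (fun i => i == 0 || !(PySem.List.pyGetD cs i ' ' == PySem.List.pyGetD cs (i - 1) ' '))
    = (pvSN cs).map (fun k : Nat => (k : Int)) := by
  rw [PySem.List.pyRange_one]
  simp only [Int.sub_zero, Int.toNat_natCast, zero_add]
  rw [List.filter_map]
  unfold pvSN
  congr 1
  apply List.filter_congr
  intro k _
  cases k with
  | zero => simp
  | succ j =>
      have h1 : ((0 : Int) + ((j + 1 : Nat) : Int)) = ((j + 1 : Nat) : Int) := by push_cast; ring
      have h2 : ((j + 1 : Nat) : Int) - 1 = ((j : Nat) : Int) := by push_cast; ring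
      simp only [Function.comp, h1, h2, PySem.List.pyGetD_natCast]
      have h3 : (((j + 1 : Nat) : Int) == 0) = false := by
        simp
        omega
      have h4 : ((j + 1 : Nat) == 0) = false := by simp
      rw [h3, h4]
      simp

-- ===== VERDICT (by name: the statement is the Claim_ definition above) =====
theorem repeatedCharacters_spec : Claim_equal_repeatedCharacters := by
  intro s _
  unfold Spec_repeatedCharacters repeatedCharacters repeatedCharacters_alt
  dsimp only
  rw [pvStartsEq]
  cases hcs : s.toList with
  | nil =>
      simp [PySem.List.pyRange_one_eq_nil, pvSN, pvFlush, PySem.List.slice]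
  | cons c rest =>
      -- A side: range fold = pair fold, then pvKey
      have hbody :
          (fun (st : ((List Int × List Int × List Int) × Int) × Int) (k : Nat) =>
            (fun (st : ((List Int × List Int × List Int) × Int) × Int) (i : Int) =>
              if PySem.List.pyGetD (c :: rest) i ' ' == PySem.List.pyGetD (c :: rest) (i - 1) ' '
              then (st.1, st.2 + 1)
              else (pvFlush st.1 st.2, 1)) st ((1 : Int) + (k : Int)))
          = (fun st k =>
              if (c :: rest).getD (1 + k) ' ' == (c :: rest).getD k ' '
              then (st.1, st.2 + 1)
              else (pvFlush st.1 st.2, 1)) := by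
        funext st k
        dsimp only
        have h1 : (1 : Int) + (k : Int) = ((1 + k : Nat) : Int) := by push_cast; ring
        have h2 : (1 : Int) + (k : Int) - 1 = ((k : Nat) : Int) := by omega
        rw [h2, h1, PySem.List.pyGetD_natCast, PySem.List.pyGetD_natCast]
      have hlen : (((c :: rest).length : Int) - 1).toNat = rest.length := by
        simp
      rw [PySem.List.pyRange_one, List.foldl_map, hlen, hbody, pvRangeFold_eq_pairFold, pvKey]
      -- B side: boundary differences = run lengths
      rw [PySem.List.slice_from_one]
      have hzip : ∀ (l : List Int) (e : Int)
          (init : (List Int × List Int × List Int) × Int),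
          (l.zip (l.tail ++ [e])).foldl (fun st ab => pvFlush st (ab.2 - ab.1)) init
          = (pvDiffs l e).foldl pvFlush init := by
        intro l e init
        rw [← List.drop_one, ← pvZipForm, List.foldl_map]
      rw [hzip, pvSN_cons]
      have hcast : ((0 : Nat) :: (pvBrk c rest).map (· + 1)).map (fun k : Nat => (k : Int))
          = (0 : Int) :: ((pvBrk c rest).map (fun k : Nat => (k : Int))).map (· + 1) := by
        rw [List.map_cons, pvCast1]
        norm_num
      have hlen2 : (((c :: rest).length : Nat) : Int) = (rest.length : Int) + 1 := by
        push_cast [List.length_cons]; ring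
      rw [hcast, hlen2, pvMain, pvRuns_cons]
      simp only [List.foldl_cons]
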